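-- pv_equiv track=rewrite | github.com/semoji-ai/chartagent | src/chartagent/normalizers/display_simplifier.py | _common_unit
-- ===== SOURCE A (Python) =====
-- from typing import Any
--
-- def _common_unit(records: list[dict[str, Any]]) -> str:
--     units = {
--         str(record.get("unit") or "").strip()
--         for record in records
--         if str(record.get("unit") or "").strip()
--     }
--     if len(units) == 1:
--         return next(iter(units))
--     return ""
-- ===== SOURCE B (Python) =====
-- def _common_unit(records):
--     candidate = None
--     for record in records:
--         u = str(record.get("unit") or "").strip()
--         if not u:
--             continue
--         if candidate is None:
--             candidate = u
--         elif u != candidate: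
--             return ""
--     return candidate if candidate is not None else ""
-- ===== Notes on version B (the rewrite author's own statement) =====
-- stated objective: simpler
-- what changed: Replaces build-a-set-then-count-it with a single short-circuiting scan that keeps one scalar candidate and returns '' on the first conflicting unit.
import Mathlib
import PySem

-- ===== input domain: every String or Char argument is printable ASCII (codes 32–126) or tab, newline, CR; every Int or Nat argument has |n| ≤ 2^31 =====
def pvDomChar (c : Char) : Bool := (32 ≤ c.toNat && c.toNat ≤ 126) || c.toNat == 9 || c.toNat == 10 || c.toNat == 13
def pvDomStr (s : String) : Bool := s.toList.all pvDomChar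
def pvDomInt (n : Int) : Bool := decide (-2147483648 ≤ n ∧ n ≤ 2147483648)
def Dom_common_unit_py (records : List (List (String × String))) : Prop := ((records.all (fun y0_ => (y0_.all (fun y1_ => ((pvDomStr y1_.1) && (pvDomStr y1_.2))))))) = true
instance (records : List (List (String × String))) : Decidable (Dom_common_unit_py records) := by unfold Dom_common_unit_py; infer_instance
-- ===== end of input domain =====

-- B: single short-circuiting scan keeping one scalar candidate, instead of A's build-a-set-then-count; return value only, no side effects.
-- ===== PORT A =====
-- str(record.get("unit") or "").strip(): values are strings, so `x or ""` is x when present (and "" stays ""), getD "" otherwise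
def pvUnit (record : List (String × String)) : String :=
  PySem.Str.strip (PySem.Dict.getD (PySem.Dict.mk record) "unit" "")

def common_unit_py (records : List (List (String × String))) : String :=
  let units : PySem.Set String :=
    records.foldl (fun s record => if pvUnit record ≠ "" then PySem.Set.add s (pvUnit record) else s) PySem.Set.empty
  if PySem.Set.len units = 1 then units.headD "" else ""

-- ===== PORT B =====
def pvGoB (records : List (List (String × String))) (candidate : Option String) : String :=
  match records with
  | [] => candidate.getD ""
  | record :: rest =>
    let u := PySem.Str.strip (PySem.Dict.getD (PySem.Dict.mk record) "unit" "")
    if u = "" then pvGoB rest candidate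
    else
      match candidate with
      | none => pvGoB rest (some u)
      | some c => if u ≠ c then "" else pvGoB rest candidate

def common_unit_py_alt (records : List (List (String × String))) : String :=
  pvGoB records none

-- ===== PRECONDITION & SPEC =====
def Spec_common_unit_py (records : List (List (String × String))) (out : String) : Prop := out = common_unit_py_alt records
instance (records : List (List (String × String))) (out : String) : Decidable (Spec_common_unit_py records out) := by unfold Spec_common_unit_py; infer_instance

-- ===== CLAIM (what is proved, stated in full; the proofs are below) =====
def Claim_equal_common_unit_py : Prop := ∀ (records : List (List (String × String))), Dom_common_unit_py records → Spec_common_unit_py records (common_unit_py records)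

-- ===== LEMMAS AND PROOFS =====
lemma pv_fold_len_mono (rest : List (List (String × String))) (s : PySem.Set String) :
    s.length ≤ (rest.foldl (fun s record => if pvUnit record ≠ "" then PySem.Set.add s (pvUnit record) else s) s).length := by
  induction rest generalizing s with
  | nil => simp
  | cons r rest ih =>
    refine le_trans ?_ (ih _)
    show s.length ≤ (if pvUnit r ≠ "" then PySem.Set.add s (pvUnit r) else s).length
    unfold PySem.Set.add
    split_ifs <;> simp

lemma pv_main (rest : List (List (String × String))) (cand : Option String) (s : PySem.Set String)
    (hinv : (cand = none ∧ s = []) ∨ (∃ c, cand = some c ∧ s = [c])) :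
    (if PySem.Set.len (rest.foldl (fun s record => if pvUnit record ≠ "" then PySem.Set.add s (pvUnit record) else s) s) = 1
      then (rest.foldl (fun s record => if pvUnit record ≠ "" then PySem.Set.add s (pvUnit record) else s) s).headD ""
      else "") = pvGoB rest cand := by
  induction rest generalizing cand s with
  | nil =>
    rcases hinv with ⟨hc, hs⟩ | ⟨c, hc, hs⟩ <;> subst hc <;> subst hs <;> simp [pvGoB, PySem.Set.len]
  | cons r rest ih =>
    simp only [List.foldl_cons]
    unfold pvGoB
    by_cases hu : PySem.Str.strip (PySem.Dict.getD (PySem.Dict.mk r) "unit" "") = ""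
    · rw [if_pos hu, if_neg (show ¬ pvUnit r ≠ "" by simp [pvUnit, hu])]
      exact ih cand s hinv
    · rw [if_neg hu, if_pos (show pvUnit r ≠ "" from hu)]
      rcases hinv with ⟨hc, hs⟩ | ⟨c, hc, hs⟩
      · subst hc; subst hs
        rw [show PySem.Set.add ([] : PySem.Set String) (pvUnit r) = [pvUnit r] by
          simp [PySem.Set.add]]
        exact ih (some (pvUnit r)) [pvUnit r] (Or.inr ⟨_, rfl, rfl⟩)
      · subst hc; subst hs
        show _ = if PySem.Str.strip (PySem.Dict.getD (PySem.Dict.mk r) "unit" "") ≠ c then "" else pvGoB rest (some c)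
        by_cases hne : PySem.Str.strip (PySem.Dict.getD (PySem.Dict.mk r) "unit" "") = c
        · rw [if_neg (show ¬ PySem.Str.strip (PySem.Dict.getD (PySem.Dict.mk r) "unit" "") ≠ c by simp [hne])]
          rw [show PySem.Set.add ([c] : PySem.Set String) (pvUnit r) = [c] by
            simp [PySem.Set.add, PySem.Set.contains, show pvUnit r = c from hne]]
          exact ih (some c) [c] (Or.inr ⟨_, rfl, rfl⟩)
        · rw [if_pos (show PySem.Str.strip (PySem.Dict.getD (PySem.Dict.mk r) "unit" "") ≠ c from hne)]
          rw [show PySem.Set.add ([c] : PySem.Set String) (pvUnit r) = [c, pvUnit r] by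
            simp [PySem.Set.add, PySem.Set.contains, pvUnit, hne]]
          rw [if_neg]
          have hlen := pv_fold_len_mono rest [c, pvUnit r]
          simp only [PySem.Set.len, List.length_cons, List.length_nil] at hlen ⊢
          intro h
          have hh : List.length (rest.foldl (fun s record => if pvUnit record ≠ "" then PySem.Set.add s (pvUnit record) else s) [c, pvUnit r]) = 1 := by exact_mod_cast h
          omega

-- ===== VERDICT (by name: the statement is the Claim_ definition above) =====
theorem common_unit_py_spec : Claim_equal_common_unit_py := by
  intro records _
  unfold Spec_common_unit_py common_unit_py common_unit_py_alt
  exact pv_main records none PySem.Set.empty (Or.inl ⟨rfl, rfl⟩)
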